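-- pv_equiv track=rewrite | github.com/saalma4/Universidad | Segundo/TALF/repo/python/whilelanguage/encoding/code2n.py | _first_level_loop
-- ===== SOURCE A (Python) =====
-- from typing import List, Tuple
--
-- def _first_level_loop(whilecode: str, loophead: str, looptail: str) -> List[Tuple[int, int]]:
--     ## find delimiters and assign a +/- sign to heads/tails, resp.
--     ##   (first character of head and last character of tail)
--     heads = [idx for idx in range(len(whilecode)) if whilecode.startswith(loophead, idx)]
--     tails = [idx + len(looptail) - 1 for idx in range(len(whilecode)) if whilecode.startswith(looptail, idx)]
--     delimiter = [*heads, *[-tail for tail in tails]]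
--     if not delimiter:
--         ## no loops found in the code
--         return []
--
--     ## sort absolute values in ascending order
--     delimiter = sorted(delimiter, key=lambda value: abs(value))
--     ## first level tails by adding signs cumulatively
--     balance = 0
--     tail_positions = []
--     for value in delimiter:
--         balance += 1 if value > 0 else -1
--         if balance == 0:
--             tail_positions.append(-value)
--     ## first level heads positions in the while code
--     head_positions = [delimiter[0]] + [delimiter[idx + 1] for idx in range(len(tail_positions) - 1)]
--     ## first level loops
--     return list(zip(head_positions, tail_positions))
-- ===== SOURCE B (Python) =====
-- from typing import List, Tuple
--
-- def _first_level_loop(whilecode: str, loophead: str, looptail: str) -> List[Tuple[int, int]]: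
--     n = len(whilecode)
--
--     def occurrences(sub: str) -> List[int]:
--         ## scan with str.find instead of testing startswith at every index
--         out = []
--         i = 0
--         while True:
--             j = whilecode.find(sub, i)
--             if j == -1 or j >= n:
--                 return out
--             out.append(j)
--             i = j + 1
--
--     heads = occurrences(loophead)
--     off = len(looptail) - 1
--     tails = [j + off for j in occurrences(looptail)]
--
--     ## linear merge of the two ascending position lists (head first on a tie),
--     ## tail positions carried negated -- no sort needed
--     stream = []
--     a = 0
--     b = 0
--     while a < len(heads) and b < len(tails):
--         if heads[a] <= tails[b]:
--             stream.append(heads[a])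
--             a += 1
--         else:
--             stream.append(-tails[b])
--             b += 1
--     stream.extend(heads[a:])
--     stream.extend(-t for t in tails[b:])
--
--     ## one fused pass: the k-th return of the balance to 0 closes the pair
--     ## (stream[k], tail); no separate head list and no zip
--     res = []
--     balance = 0
--     for v in stream:
--         balance += 1 if v > 0 else -1
--         if balance == 0:
--             res.append((stream[len(res)], -v))
--     return res
-- ===== Notes on version B (the rewrite author's own statement) =====
-- stated objective: faster
-- what changed: B finds delimiter occurrences by repeated str.find scanning instead of testing startswith at every index, replaces the key-sort of the combined list by a linear two-pointer merge of the two already-ascending position lists, and fuses the balance pass, head-list construction and zip into one pass that emits each pair directly.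
-- outside the precondition, e.g. on _first_level_loop('ab', 'a', ''): A returns [], B returns [(1, 0)]
import Mathlib
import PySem

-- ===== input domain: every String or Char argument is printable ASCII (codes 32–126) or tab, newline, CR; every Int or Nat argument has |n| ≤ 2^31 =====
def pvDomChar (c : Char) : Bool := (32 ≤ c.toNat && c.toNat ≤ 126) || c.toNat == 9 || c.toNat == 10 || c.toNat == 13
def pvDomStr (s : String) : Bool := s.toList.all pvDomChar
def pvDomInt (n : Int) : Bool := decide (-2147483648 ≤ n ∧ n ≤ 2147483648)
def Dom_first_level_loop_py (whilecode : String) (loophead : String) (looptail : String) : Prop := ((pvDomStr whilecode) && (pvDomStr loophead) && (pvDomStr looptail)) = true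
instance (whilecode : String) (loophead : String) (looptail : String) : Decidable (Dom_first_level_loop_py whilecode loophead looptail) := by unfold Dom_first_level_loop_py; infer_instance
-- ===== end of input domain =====

-- B replaces A's per-index startswith scan by str.find occurrence scanning, the abs-keyed sort by a
-- linear merge of the two ascending position lists, and fuses the balance/zip phases into one pass (objective: faster).


-- ===== PORT A =====
def first_level_loop_py (whilecode : String) (loophead : String) (looptail : String) : List (Int × Int) :=
  let cs := whilecode.toList
  let hp := loophead.toList
  let tp := looptail.toList
  let heads : List Int := (PySem.List.pyRange 0 (cs.length : Int)).filter
    (fun idx => PySem.Chars.startswith (cs.drop idx.toNat) hp)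
  let tails : List Int := ((PySem.List.pyRange 0 (cs.length : Int)).filter
    (fun idx => PySem.Chars.startswith (cs.drop idx.toNat) tp)).map
    (fun idx => idx + (tp.length : Int) - 1)
  let delimiter := heads ++ tails.map (fun t => -t)
  if delimiter = [] then []
  else
    let d := PySem.List.sorted delimiter (fun v => |v|)
    let st := d.foldl (fun (st : Int × List Int) v =>
        let b := st.1 + (if 0 < v then (1 : Int) else -1)
        (b, if b = 0 then st.2 ++ [-v] else st.2)) (0, [])
    let tail_positions := st.2
    let head_positions := [PySem.List.pyGetD d 0 0] ++
      (PySem.List.pyRange 0 ((tail_positions.length : Int) - 1)).map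
        (fun i => PySem.List.pyGetD d (i + 1) 0)
    head_positions.zip tail_positions

-- ===== PORT B =====
-- Source B's find-scan `occurrences` (the `i ≤ cs.length` conjunct only makes the recursion
-- visibly terminating: for a start past the end, find returns -1 and the loop stops anyway)
def pvOccGo (cs sub : List Char) (i : Nat) : List Int :=
  let j := PySem.Chars.findFrom cs sub (i : Int)
  if h : 0 ≤ j ∧ j < (cs.length : Int) ∧ i ≤ cs.length then
    j :: pvOccGo cs sub (j.toNat + 1)
  else []
termination_by cs.length - i
decreasing_by
  have hne : PySem.Chars.findFrom cs sub (i : Int) ≠ -1 := by omega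
  have := (PySem.Chars.findFrom_natCast_spec cs sub i h.2.2 hne).1
  omega

-- Source B's two-pointer merge, the two index pointers rendered as the suffix lists they point at
def pvMerge (hs ts : List Int) : List Int :=
  match hs, ts with
  | [], ts => ts.map (fun t => -t)
  | h :: hs', [] => h :: hs'
  | h :: hs', t :: ts' =>
    if h ≤ t then h :: pvMerge hs' (t :: ts') else (-t) :: pvMerge (h :: hs') ts'

def first_level_loop_py_alt (whilecode : String) (loophead : String) (looptail : String) : List (Int × Int) :=
  let cs := whilecode.toList
  let heads := pvOccGo cs loophead.toList 0
  let off : Int := (looptail.toList.length : Int) - 1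
  let tails := (pvOccGo cs looptail.toList 0).map (fun j => j + off)
  let stream := pvMerge heads tails
  (stream.foldl (fun (st : Int × List (Int × Int)) v =>
      let b := st.1 + (if 0 < v then (1 : Int) else -1)
      (b, if b = 0 then st.2 ++ [(PySem.List.pyGetD stream (st.2.length : Int) 0, -v)] else st.2))
    (0, [])).2

-- ===== PRECONDITION & SPEC =====
-- Pre_ excludes only an empty looptail delimiter: there A's tail "end positions" are idx-1
-- (including the out-of-string position -1), and the abs-keyed interleaving of those negated
-- values is an accident of A's sort that no longer describes an ascending position list.
def Pre_first_level_loop_py (whilecode : String) (loophead : String) (looptail : String) : Prop :=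
  looptail ≠ ""
instance (whilecode : String) (loophead : String) (looptail : String) : Decidable (Pre_first_level_loop_py whilecode loophead looptail) := by unfold Pre_first_level_loop_py; infer_instance

def pvWitness_first_level_loop_py : String × String × String := ("a LOOP x END b", "LOOP", "END")

def Spec_first_level_loop_py (whilecode : String) (loophead : String) (looptail : String) (out : List (Int × Int)) : Prop := out = first_level_loop_py_alt whilecode loophead looptail
instance (whilecode : String) (loophead : String) (looptail : String) (out : List (Int × Int)) : Decidable (Spec_first_level_loop_py whilecode loophead looptail out) := by unfold Spec_first_level_loop_py; infer_instance

-- ===== CLAIM (what is proved, stated in full; the proofs are below) =====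
def Claim_equal_first_level_loop_py : Prop := ∀ (whilecode : String) (loophead : String) (looptail : String), Dom_first_level_loop_py whilecode loophead looptail → Pre_first_level_loop_py whilecode loophead looptail → Spec_first_level_loop_py whilecode loophead looptail (first_level_loop_py whilecode loophead looptail)

-- ===== LEMMAS AND PROOFS =====

-- occurrence scanning: the find loop of B returns exactly the match positions ≥ i, in order
-- first match peeled off the filtered range
theorem filter_range_first (n j : Nat) (p : Nat → Bool) (hj : j < n) (hp : p j = true) :
    (List.range n).filter (fun k => decide (j ≤ k) && p k) =
      j :: (List.range n).filter (fun k => decide (j + 1 ≤ k) && p k) := by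
  induction n with
  | zero => omega
  | succ n ih =>
    rw [List.range_succ, List.filter_append, List.filter_append]
    rcases Nat.lt_or_ge j n with h | h
    · rw [ih h]
      simp only [List.filter_singleton]
      have h1 : decide (j ≤ n) = true := by simp; omega
      have h2 : decide (j + 1 ≤ n) = true := by simp; omega
      rw [h1, h2]
      simp
    · have hjn : j = n := by omega
      subst hjn
      have e1 : (List.range j).filter (fun k => decide (j ≤ k) && p k) = [] := by
        apply List.filter_eq_nil_iff.mpr
        intro k hk
        simp at hk ⊢
        omega
      have e2 : (List.range j).filter (fun k => decide (j + 1 ≤ k) && p k) = [] := by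
        apply List.filter_eq_nil_iff.mpr
        intro k hk
        simp at hk ⊢
        omega
      rw [e1, e2]
      simp [hp]

theorem drop_prefix_infix {cs sub : List Char} {x k : Nat} (hxk : x ≤ k)
    (h : sub <+: List.drop k cs) : sub <:+: List.drop x cs := by
  have hd : List.drop k cs = List.drop (k - x) (List.drop x cs) := by
    rw [List.drop_drop]; congr 1; omega
  rw [hd] at h
  exact h.isInfix.trans (List.drop_suffix _ _).isInfix

theorem pvOccGo_eq_filter (cs sub : List Char) : ∀ (i : Nat), i ≤ cs.length →
    pvOccGo cs sub i =
      List.map (fun k : Nat => (k : Int))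
        ((List.range cs.length).filter
          (fun k => decide (i ≤ k) && PySem.Chars.startswith (List.drop k cs) sub)) := by
  intro i
  induction i using pvOccGo.induct cs sub with
  | case1 x _jv h ih =>
    intro hi
    have hne : PySem.Chars.findFrom cs sub (x : Int) ≠ -1 := by omega
    obtain ⟨hxj, hpre, hmin⟩ := PySem.Chars.findFrom_natCast_spec cs sub x h.2.2 hne
    have h0 : (0 : Int) ≤ PySem.Chars.findFrom cs sub (x : Int) := h.1
    have hjlt : (PySem.Chars.findFrom cs sub (x : Int)).toNat < cs.length := by omega
    have hxle : x ≤ (PySem.Chars.findFrom cs sub (x : Int)).toNat := by omega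
    have hstep1 : (List.range cs.length).filter
        (fun k => decide (x ≤ k) && PySem.Chars.startswith (List.drop k cs) sub) =
        (List.range cs.length).filter
        (fun k => decide ((PySem.Chars.findFrom cs sub (x : Int)).toNat ≤ k) &&
          PySem.Chars.startswith (List.drop k cs) sub) := by
      apply List.filter_congr
      intro k _
      by_cases h1 : (PySem.Chars.findFrom cs sub (x : Int)).toNat ≤ k
      · have h2 : x ≤ k := by omega
        simp [h1, h2]
      · by_cases h2 : x ≤ k
        · have hP : PySem.Chars.startswith (List.drop k cs) sub = false := by
            rw [Bool.eq_false_iff, Ne, PySem.Chars.startswith_iff]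
            exact hmin k h2 (by omega)
          simp [hP]
        · have e1 : decide (x ≤ k) = false := by simp; omega
          have e2 : decide ((PySem.Chars.findFrom cs sub (x : Int)).toNat ≤ k) = false := by
            simp; omega
          rw [e1, e2]
    rw [hstep1, filter_range_first cs.length _ _ hjlt
        (by rw [PySem.Chars.startswith_iff]; exact hpre)]
    rw [pvOccGo]
    rw [dif_pos h, ih hjlt]
    simp only [List.map_cons, Int.toNat_of_nonneg h0]
    rfl
  | case2 x _jv h =>
    intro hi
    rw [pvOccGo]
    rw [dif_neg h]
    symm
    rw [List.map_eq_nil_iff]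
    apply List.filter_eq_nil_iff.mpr
    intro k hk
    simp only [List.mem_range] at hk
    by_cases hneg : PySem.Chars.findFrom cs sub (x : Int) = -1
    · have hnin := (PySem.Chars.findFrom_natCast_eq_neg_one_iff cs sub x hi).mp hneg
      simp only [Bool.and_eq_true, decide_eq_true_eq, not_and]
      intro hxk hP
      exact hnin (drop_prefix_infix hxk ((PySem.Chars.startswith_iff _ _).mp hP))
    · obtain ⟨hxj, hpre, hmin⟩ := PySem.Chars.findFrom_natCast_spec cs sub x hi hneg
      have h0 : (0:Int) ≤ PySem.Chars.findFrom cs sub (x : Int) := by omega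
      have hlen : (cs.length : Int) ≤ PySem.Chars.findFrom cs sub (x : Int) := by
        by_contra hc
        exact h ⟨h0, by omega, hi⟩
      simp only [Bool.and_eq_true, decide_eq_true_eq, not_and]
      intro hxk hP
      exact hmin k hxk (by omega) ((PySem.Chars.startswith_iff _ _).mp hP)

-- A's range/startswith comprehension = B's find scan from 0
theorem pvHeads_eq (cs sub : List Char) :
    (PySem.List.pyRange 0 (cs.length : Int)).filter
      (fun idx => PySem.Chars.startswith (List.drop idx.toNat cs) sub) = pvOccGo cs sub 0 := by
  rw [pvOccGo_eq_filter cs sub 0 (Nat.zero_le _), PySem.List.pyRange_zero_natCast,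
    List.filter_map]
  congr 1

-- A's stable insertion sort by |·| of heads ++ negated tails = B's linear merge
def pvIns (x : Int) (acc : List Int) : List Int :=
  PySem.List.insertBy (fun a b => decide (|a| < |b|)) x acc

theorem pvIns_append (x : Int) (pre rest : List Int) (hpre : ∀ y ∈ pre, ¬ |x| < |y|) :
    pvIns x (pre ++ rest) = pre ++ pvIns x rest := by
  induction pre with
  | nil => rfl
  | cons p pre' ih =>
    have hp : decide (|x| < |p|) = false := by
      simp only [decide_eq_false_iff_not]
      exact hpre p (by simp)
    show PySem.List.insertBy _ x (p :: (pre' ++ rest)) = _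
    rw [show PySem.List.insertBy (fun a b => decide (|a| < |b|)) x (p :: (pre' ++ rest)) =
        if decide (|x| < |p|) then x :: p :: (pre' ++ rest)
        else p :: PySem.List.insertBy (fun a b => decide (|a| < |b|)) x (pre' ++ rest) from rfl]
    rw [hp]
    simp only [Bool.false_eq_true, if_false, List.cons_append]
    congr 1
    exact ih (fun y hy => hpre y (by simp [hy]))

theorem pvMergeFold (ts : List Int) : ∀ (hs pre : List Int),
    List.Pairwise (· ≤ ·) ts → (∀ t ∈ ts, 0 ≤ t) →
    List.Pairwise (· ≤ ·) hs → (∀ h ∈ hs, 0 ≤ h) →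
    (∀ y ∈ pre, ∀ t ∈ ts, |y| ≤ t) →
    List.foldl (fun acc x => pvIns x acc) (pre ++ hs) (ts.map (fun t => -t)) =
      pre ++ pvMerge hs ts := by
  induction ts with
  | nil =>
    intro hs pre _ _ _ _ _
    cases hs <;> simp [pvMerge]
  | cons t ts' ihts =>
    intro hs
    induction hs with
    | nil =>
      intro pre hts hts0 _ _ hpre
      have ht0 : (0:Int) ≤ t := hts0 t (by simp)
      simp only [List.map_cons, List.foldl_cons, List.append_nil]
      rw [show pvIns (-t) pre = PySem.List.insertBy (fun a b => decide (|a| < |b|)) (-t) pre from rfl]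
      rw [PySem.List.insertBy_of_forall_not_before _ _ _ (by
        intro y hy
        simp only [decide_eq_false_iff_not]
        have := hpre y hy t (by simp)
        rw [abs_neg, abs_of_nonneg ht0]
        omega)]
      have := ihts [] (pre ++ [-t]) (hts.sublist (List.sublist_cons_self t ts'))
        (fun t' ht' => hts0 t' (by simp [ht']))
        List.Pairwise.nil (by simp)
        (by
          intro y hy t' ht'
          have ht't : t ≤ t' := (List.pairwise_cons.mp hts).1 t' ht'
          rcases List.mem_append.mp hy with hy | hy
          · exact le_trans (hpre y hy t (by simp)) ht't
          · simp at hy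
            subst hy
            rw [abs_neg, abs_of_nonneg ht0]
            exact ht't)
      simp only [List.append_nil] at this
      rw [this]
      simp [pvMerge]
    | cons h hs'' ihhs =>
      intro pre hts hts0 hhs hhs0 hpre
      have ht0 : (0:Int) ≤ t := hts0 t (by simp)
      have hh0 : (0:Int) ≤ h := hhs0 h (by simp)
      by_cases hht : h ≤ t
      · have e : pre ++ h :: hs'' = (pre ++ [h]) ++ hs'' := by simp
        rw [e, ihhs (pre ++ [h]) hts hts0 (List.pairwise_cons.mp hhs).2
          (fun h' hh' => hhs0 h' (by simp [hh']))
          (by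
            intro y hy t' ht'
            rcases List.mem_append.mp hy with hy | hy
            · exact hpre y hy t' ht'
            · simp at hy
              subst hy
              rw [abs_of_nonneg hh0]
              rcases List.mem_cons.mp ht' with h1 | h1
              · omega
              · exact le_trans hht ((List.pairwise_cons.mp hts).1 t' h1))]
        rw [pvMerge, if_pos hht]
        simp
      · simp only [List.map_cons, List.foldl_cons]
        rw [pvIns_append (-t) pre (h :: hs'') (by
          intro y hy
          have := hpre y hy t (by simp)
          rw [abs_neg, abs_of_nonneg ht0]
          omega)]
        have hins : pvIns (-t) (h :: hs'') = -t :: h :: hs'' := by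
          rw [show pvIns (-t) (h :: hs'') =
              if decide (|(-t)| < |h|) then (-t) :: h :: hs''
              else h :: pvIns (-t) hs'' from rfl]
          rw [show decide (|(-t)| < |h|) = true from by
            simp only [decide_eq_true_eq, abs_neg, abs_of_nonneg ht0, abs_of_nonneg hh0]
            omega]
          simp
        rw [hins]
        have e : pre ++ (-t :: h :: hs'') = (pre ++ [-t]) ++ (h :: hs'') := by simp
        rw [e, ihts (h :: hs'') (pre ++ [-t]) (List.pairwise_cons.mp hts).2
          (fun t' ht' => hts0 t' (by simp [ht'])) hhs hhs0
          (by
            intro y hy t' ht'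
            have htt' : t ≤ t' := (List.pairwise_cons.mp hts).1 t' ht'
            rcases List.mem_append.mp hy with hy | hy
            · exact le_trans (hpre y hy t (by simp)) htt'
            · simp at hy
              subst hy
              rw [abs_neg, abs_of_nonneg ht0]
              exact htt')]
        rw [pvMerge, if_neg hht]
        simp

theorem pvSorted_eq_merge (hs ts : List Int)
    (hhs : List.Pairwise (· ≤ ·) hs) (hhs0 : ∀ h ∈ hs, 0 ≤ h)
    (hts : List.Pairwise (· ≤ ·) ts) (hts0 : ∀ t ∈ ts, 0 ≤ t) :
    PySem.List.sorted (hs ++ ts.map (fun t => -t)) (fun v => |v|) = pvMerge hs ts := by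
  rw [PySem.List.sorted_eq_foldl_insertBy, List.foldl_append]
  have h1 : List.foldl
      (fun acc x => PySem.List.insertBy (fun a b => decide (|a| < |b|)) x acc) [] hs = hs := by
    rw [← PySem.List.sorted_eq_foldl_insertBy]
    apply PySem.List.sorted_eq_self_of_pairwise
    apply hhs.imp_of_mem
    intro a b ha hb hab
    rw [abs_of_nonneg (hhs0 a ha), abs_of_nonneg (hhs0 b hb)]
    exact hab
  rw [h1]
  have := pvMergeFold ts hs [] hts hts0 hhs hhs0 (by simp)
  simpa using this

-- B's fused pass = A's balance pass zipped with the d-prefix (head positions)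
theorem pvFinalPass (d : List Int) : ∀ (v u : List Int), d = u ++ v →
    ∀ (bal : Int) (tp : List Int) (res : List (Int × Int)),
    res = (List.take tp.length d).zip tp → tp.length ≤ u.length →
    (v.foldl (fun (st : Int × List (Int × Int)) x =>
        let b := st.1 + (if 0 < x then (1 : Int) else -1)
        (b, if b = 0 then st.2 ++ [(PySem.List.pyGetD d (st.2.length : Int) 0, -x)] else st.2))
      (bal, res)) =
    ((v.foldl (fun (st : Int × List Int) x =>
        let b := st.1 + (if 0 < x then (1 : Int) else -1)
        (b, if b = 0 then st.2 ++ [-x] else st.2)) (bal, tp)).1,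
      (List.take (v.foldl (fun (st : Int × List Int) x =>
        let b := st.1 + (if 0 < x then (1 : Int) else -1)
        (b, if b = 0 then st.2 ++ [-x] else st.2)) (bal, tp)).2.length d).zip
      (v.foldl (fun (st : Int × List Int) x =>
        let b := st.1 + (if 0 < x then (1 : Int) else -1)
        (b, if b = 0 then st.2 ++ [-x] else st.2)) (bal, tp)).2) ∧
    (v.foldl (fun (st : Int × List Int) x =>
        let b := st.1 + (if 0 < x then (1 : Int) else -1)
        (b, if b = 0 then st.2 ++ [-x] else st.2)) (bal, tp)).2.length ≤ u.length + v.length := by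
  intro v
  induction v with
  | nil =>
    intro u hd bal tp res hres hlen
    simp only [List.foldl_nil, List.length_nil, Nat.add_zero]
    exact ⟨by rw [hres], hlen⟩
  | cons x v' ih =>
    intro u hd bal tp res hres hlen
    have hdlen : u.length < d.length := by
      subst hd; simp
    have hreslen : res.length = tp.length := by
      rw [hres, List.length_zip, List.length_take]
      omega
    simp only [List.foldl_cons]
    have hd' : d = (u ++ [x]) ++ v' := by simp [hd]
    by_cases hb : bal + (if 0 < x then (1 : Int) else -1) = 0
    · rw [if_pos hb, if_pos hb]
      have hm : tp.length < d.length := by omega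
      have hget : PySem.List.pyGetD d ((res.length : Nat) : Int) 0 = d[tp.length] := by
        rw [hreslen, PySem.List.pyGetD_eq_getElem d 0 (Int.natCast_nonneg _)
          (by exact_mod_cast hm)]
        simp
      have hres' : res ++ [(PySem.List.pyGetD d ((res.length : Nat) : Int) 0, -x)] =
          (List.take (tp ++ [-x]).length d).zip (tp ++ [-x]) := by
        rw [hget, List.length_append, List.length_singleton, List.take_add_one,
          List.getElem?_eq_getElem hm]
        rw [List.zip_append (by rw [List.length_take]; omega)]
        rw [← hres]
        rfl
      have := ih (u ++ [x]) hd' (bal + (if 0 < x then (1 : Int) else -1)) (tp ++ [-x]) _ hres'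
        (by simp; omega)
      refine ⟨this.1, ?_⟩
      have h2 := this.2
      have e : (u ++ [x]).length + v'.length = u.length + (x :: v').length := by
        simp [List.length_append]
        omega
      rw [e] at h2
      exact h2
    · rw [if_neg hb, if_neg hb]
      have := ih (u ++ [x]) hd' (bal + (if 0 < x then (1 : Int) else -1)) tp res hres
        (by simp; omega)
      refine ⟨this.1, ?_⟩
      have h2 := this.2
      have e : (u ++ [x]).length + v'.length = u.length + (x :: v').length := by
        simp [List.length_append]
        omega
      rw [e] at h2
      exact h2

-- A's head-position list is the m-prefix of the sorted delimiter list
theorem pvHeadPos_eq_take (d : List Int) (m : Nat) (h1 : 1 ≤ m) (h2 : m ≤ d.length) :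
    [PySem.List.pyGetD d 0 0] ++
      (PySem.List.pyRange 0 ((m : Int) - 1)).map (fun i => PySem.List.pyGetD d (i + 1) 0) =
    List.take m d := by
  have e : ((m : Int) - 1) = ((m - 1 : Nat) : Int) := by omega
  rw [e, PySem.List.pyRange_zero_natCast, List.map_map, List.singleton_append]
  apply List.ext_getElem
  · simp
    omega
  · intro k hk1 hk2
    have hklt : k < m := by
      simp only [List.length_take] at hk2
      omega
    rcases Nat.eq_zero_or_pos k with hk0 | hkp
    · subst hk0
      simp only [List.getElem_cons_zero]
      rw [PySem.List.pyGetD_eq_getElem d 0 le_rfl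
        (by exact_mod_cast Nat.lt_of_lt_of_le h1 h2)]
      simp
    · obtain ⟨k', rfl⟩ : ∃ k', k = k' + 1 := ⟨k - 1, by omega⟩
      simp only [List.getElem_cons_succ, List.getElem_map, List.getElem_range,
        Function.comp_apply]
      rw [PySem.List.pyGetD_eq_getElem d 0 (by positivity) (by omega)]
      rw [List.getElem_take]
      congr 1

-- ===== VERDICT (by name: the statement is the Claim_ definition above) =====
theorem first_level_loop_py_spec : Claim_equal_first_level_loop_py := by
  intro wc lh lt _ hpre
  unfold Spec_first_level_loop_py first_level_loop_py first_level_loop_py_alt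
  have hlt : 1 ≤ lt.toList.length := by
    have h : lt.toList ≠ [] := by simpa using hpre
    have := List.length_pos_iff.mpr h
    omega
  dsimp only
  rw [pvHeads_eq wc.toList lh.toList, pvHeads_eq wc.toList lt.toList]
  have hfun : (fun idx : Int => idx + (lt.toList.length : Int) - 1) =
      (fun j : Int => j + ((lt.toList.length : Int) - 1)) := by
    funext j
    ring
  rw [hfun]
  set heads := pvOccGo wc.toList lh.toList 0 with hheads
  set tails := (pvOccGo wc.toList lt.toList 0).map
    (fun j => j + ((lt.toList.length : Int) - 1)) with htails
  -- order and sign facts feeding the merge lemma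
  have hocc_pw : ∀ sub : List Char, List.Pairwise (· ≤ ·) (pvOccGo wc.toList sub 0) := by
    intro sub
    rw [pvOccGo_eq_filter wc.toList sub 0 (Nat.zero_le _)]
    rw [List.pairwise_map]
    apply List.Pairwise.imp ?_ ((List.pairwise_lt_range).filter _)
    intro a b hab
    exact le_of_lt (by exact_mod_cast hab)
  have hocc0 : ∀ (sub : List Char) (x : Int), x ∈ pvOccGo wc.toList sub 0 → 0 ≤ x := by
    intro sub x hx
    rw [pvOccGo_eq_filter wc.toList sub 0 (Nat.zero_le _)] at hx
    obtain ⟨k, _, rfl⟩ := List.mem_map.mp hx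
    exact Int.natCast_nonneg k
  have hhs : List.Pairwise (· ≤ ·) heads := hocc_pw lh.toList
  have hhs0 : ∀ h ∈ heads, 0 ≤ h := hocc0 lh.toList
  have hts : List.Pairwise (· ≤ ·) tails := by
    rw [htails, List.pairwise_map]
    apply List.Pairwise.imp ?_ (hocc_pw lt.toList)
    intro a b hab
    omega
  have hts0 : ∀ t ∈ tails, 0 ≤ t := by
    intro t ht
    rw [htails] at ht
    obtain ⟨j, hj, rfl⟩ := List.mem_map.mp ht
    have := hocc0 lt.toList j hj
    omega
  by_cases hemp : heads ++ tails.map (fun t => -t) = []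
  · rw [if_pos hemp]
    obtain ⟨h1, h2⟩ := List.append_eq_nil_iff.mp hemp
    rw [List.map_eq_nil_iff] at h2
    rw [h1, h2]
    simp [pvMerge]
  · rw [if_neg hemp]
    rw [pvSorted_eq_merge heads tails hhs hhs0 hts hts0]
    obtain ⟨hBeq, hlen⟩ := pvFinalPass (pvMerge heads tails) (pvMerge heads tails) []
      (by simp) 0 [] [] (by simp) (by simp)
    rw [hBeq]
    simp only []
    set tpos := ((pvMerge heads tails).foldl (fun (st : Int × List Int) v =>
        let b := st.1 + (if 0 < v then (1 : Int) else -1)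
        (b, if b = 0 then st.2 ++ [-v] else st.2)) (0, [])).2 with htpos
    rcases Nat.eq_zero_or_pos tpos.length with hm | hm
    · rw [List.length_eq_zero_iff.mp hm]
      simp [List.zip_nil_right]
    · rw [pvHeadPos_eq_take (pvMerge heads tails) tpos.length hm (by simpa using hlen)]
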